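-- pv_equiv track=rewrite | github.com/effoT/codingbat-py | String-2.py | zipZap
-- ===== SOURCE A (Python) =====
-- def zipZap(text):
--     o = 0
--     while(o < len(text) -2):
--         if text[o] == "z" and text[o+2] == "p":
--             temp_text = text[:(o+1)]
--             temp_text += text[(o+2):]
--             text = temp_text
--         o += 1
--     return text
-- ===== SOURCE B (Python) =====
-- def zipZap(text):
--     out = []
--     i = 0
--     n = len(text)
--     while i < n:
--         if i + 2 < n and text[i] == "z" and text[i + 2] == "p":
--             out.append("zp")
--             i += 3
--         else:
--             out.append(text[i])
--             i += 1
--     return "".join(out)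
-- ===== Notes on version B (the rewrite author's own statement) =====
-- stated objective: simpler
-- what changed: Instead of repeatedly splicing the string in place with an index that chases the shrinking string, B makes one left-to-right pass appending to an output buffer, emitting 'zp' and skipping 3 chars on each z_p match.
import Mathlib
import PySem

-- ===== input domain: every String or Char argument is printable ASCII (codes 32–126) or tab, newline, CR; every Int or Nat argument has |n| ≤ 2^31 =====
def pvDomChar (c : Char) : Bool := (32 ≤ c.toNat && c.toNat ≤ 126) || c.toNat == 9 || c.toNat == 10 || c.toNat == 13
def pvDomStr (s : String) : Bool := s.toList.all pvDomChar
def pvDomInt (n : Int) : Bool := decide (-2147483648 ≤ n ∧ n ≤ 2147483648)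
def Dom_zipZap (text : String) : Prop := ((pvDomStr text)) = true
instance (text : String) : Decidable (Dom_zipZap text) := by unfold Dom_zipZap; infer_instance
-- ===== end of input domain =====

-- B replaces A's in-place splicing loop by a single left-to-right pass with an output buffer (simpler).

-- ===== PORT A =====
-- A's while loop: o advances by 1; on a match the char at o+1 is removed from the (shrinking) string.
-- Indices o, o+2 are in range (o+2 < len), so getD is exact; slices text[:(o+1)], text[(o+2):] with
-- nonnegative in-range bounds are exactly take/drop.
def zipZapAgo (cs : List Char) (o : Nat) : List Char :=
  if o + 2 < cs.length then
    if cs.getD o ' ' = 'z' ∧ cs.getD (o + 2) ' ' = 'p' then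
      zipZapAgo (cs.take (o + 1) ++ cs.drop (o + 2)) (o + 1)
    else
      zipZapAgo cs (o + 1)
  else cs
termination_by cs.length - o
decreasing_by
  · simp only [List.length_append, List.length_take, List.length_drop]; omega
  · omega

def zipZap (text : String) : String := String.mk (zipZapAgo text.toList 0)

-- ===== PORT B =====
-- B's while loop: i advances by 3 on a match (appending "zp"), else by 1 (appending text[i]).
def zipZapBgo (cs : List Char) (i : Nat) (acc : List Char) : List Char :=
  if i < cs.length then
    if i + 2 < cs.length ∧ cs.getD i ' ' = 'z' ∧ cs.getD (i + 2) ' ' = 'p' then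
      zipZapBgo cs (i + 3) (acc ++ ['z', 'p'])
    else
      zipZapBgo cs (i + 1) (acc ++ [cs.getD i ' '])
  else acc
termination_by cs.length - i
decreasing_by
  · omega
  · omega

def zipZap_alt (text : String) : String := String.mk (zipZapBgo text.toList 0 [])

-- ===== PRECONDITION & SPEC =====
def Spec_zipZap (text : String) (out : String) : Prop := out = zipZap_alt text
instance (text : String) (out : String) : Decidable (Spec_zipZap text out) := by unfold Spec_zipZap; infer_instance

-- ===== CLAIM (what is proved, stated in full; the proofs are below) =====
def Claim_equal_zipZap : Prop := ∀ (text : String), Dom_zipZap text → Spec_zipZap text (zipZap text)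

-- ===== LEMMAS AND PROOFS =====

-- Canonical form of the transformation: one structural pass.
def zz : List Char → List Char
  | a :: b :: c :: rest =>
      if a = 'z' ∧ c = 'p' then 'z' :: 'p' :: zz rest
      else a :: zz (b :: c :: rest)
  | l => l
termination_by l => l.length

theorem zz_short (l : List Char) (h : l.length ≤ 2) : zz l = l := by
  match l with
  | [] => simp [zz]
  | [a] => simp [zz]
  | [a, b] => simp [zz]
  | a :: b :: c :: rest => simp at h

theorem zz_cons_ne (a : Char) (t : List Char) (h : a ≠ 'z') : zz (a :: t) = a :: zz t := by
  match t with
  | [] => simp [zz]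
  | [b] => simp [zz]
  | b :: c :: rest => rw [zz]; simp [h]

theorem zz_cons_of_not (a : Char) (t : List Char)
    (h : ¬ (a = 'z' ∧ t.getD 1 ' ' = 'p')) (ht : 2 ≤ t.length) :
    zz (a :: t) = a :: zz t := by
  match t with
  | b :: c :: rest =>
      rw [zz]
      simp only [List.getD_cons_succ, List.getD_cons_zero] at h
      simp [h]

theorem drop_getD_cons (cs : List Char) (i : Nat) (h : i < cs.length) :
    cs.drop i = cs.getD i ' ' :: cs.drop (i + 1) := by
  rw [List.drop_eq_getElem_cons h, List.getD_eq_getElem?_getD, List.getElem?_eq_getElem h]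
  rfl

theorem take_getD_snoc (cs : List Char) (o : Nat) (h : o < cs.length) :
    cs.take (o + 1) = cs.take o ++ [cs.getD o ' '] := by
  rw [List.take_add_one, List.getD_eq_getElem?_getD, List.getElem?_eq_getElem h]
  rfl

theorem zipZapBgo_eq_aux (n : Nat) (cs : List Char) (i : Nat) (acc : List Char)
    (hn : cs.length - i ≤ n) :
    zipZapBgo cs i acc = acc ++ zz (cs.drop i) := by
  induction n generalizing i acc with
  | zero =>
      rw [zipZapBgo]
      have hi : ¬ i < cs.length := by omega
      have h0 : cs.drop i = [] := List.drop_eq_nil_of_le (by omega)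
      rw [if_neg hi, h0, zz_short _ (by simp)]
      simp
  | succ n ih =>
      rw [zipZapBgo]
      by_cases hi : i < cs.length
      · simp only [hi, if_true]
        have hdrop := drop_getD_cons cs i hi
        by_cases hc : i + 2 < cs.length ∧ cs.getD i ' ' = 'z' ∧ cs.getD (i + 2) ' ' = 'p'
        · obtain ⟨h2, hz, hp⟩ := hc
          have h1 : i + 1 < cs.length := by omega
          have hdrop1 := drop_getD_cons cs (i + 1) h1
          have hdrop2 := drop_getD_cons cs (i + 2) h2
          simp only [h2, hz, hp, and_self, if_true]
          rw [ih (i + 3) _ (by omega)]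
          rw [hdrop, hdrop1, hdrop2, hz, hp, zz]
          simp
        · simp only [hc, if_false]
          rw [ih (i + 1) _ (by omega)]
          rw [hdrop]
          by_cases hlen : i + 2 < cs.length
          · have hget1 : (cs.drop (i + 1)).getD 1 ' ' = cs.getD (i + 2) ' ' := by
              simp [List.getD_eq_getElem?_getD]
            have ht : 2 ≤ (cs.drop (i + 1)).length := by simp; omega
            rw [zz_cons_of_not _ _ (by rw [hget1]; tauto) ht]
            simp
          · have hshort1 : (cs.drop (i + 1)).length ≤ 2 := by simp; omega
            have hshort : (cs.getD i ' ' :: cs.drop (i + 1)).length ≤ 2 := by simp; omega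
            rw [zz_short _ hshort, zz_short _ hshort1]
            simp
      · simp only [hi, if_false]
        have h0 : cs.drop i = [] := List.drop_eq_nil_of_le (by omega)
        rw [h0, zz_short _ (by simp)]
        simp

theorem zipZapBgo_eq (cs : List Char) (i : Nat) (acc : List Char) :
    zipZapBgo cs i acc = acc ++ zz (cs.drop i) :=
  zipZapBgo_eq_aux cs.length cs i acc (by omega)

theorem zipZapAgo_eq_aux (n : Nat) (cs : List Char) (o : Nat)
    (hn : cs.length - o ≤ n) :
    zipZapAgo cs o = cs.take o ++ zz (cs.drop o) := by
  induction n generalizing cs o with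
  | zero =>
      rw [zipZapAgo]
      have h2 : ¬ o + 2 < cs.length := by omega
      have hshort : (cs.drop o).length ≤ 2 := by simp; omega
      rw [if_neg h2, zz_short _ hshort]
      simp
  | succ n ih =>
      rw [zipZapAgo]
      by_cases h2 : o + 2 < cs.length
      · simp only [h2, if_true]
        have ho : o < cs.length := by omega
        have h1 : o + 1 < cs.length := by omega
        have hdrop := drop_getD_cons cs o ho
        have hdrop1 := drop_getD_cons cs (o + 1) h1
        have hdrop2 := drop_getD_cons cs (o + 2) h2
        by_cases hc : cs.getD o ' ' = 'z' ∧ cs.getD (o + 2) ' ' = 'p'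
        · obtain ⟨hz, hp⟩ := hc
          simp only [hz, hp, and_self, if_true]
          rw [ih (cs.take (o + 1) ++ cs.drop (o + 2)) (o + 1)
                (by simp only [List.length_append, List.length_take, List.length_drop]; omega)]
          have htk : (cs.take (o + 1) ++ cs.drop (o + 2)).take (o + 1) = cs.take (o + 1) := by
            rw [List.take_append_of_le_length (by simp; omega)]
            simp
          have hdr : (cs.take (o + 1) ++ cs.drop (o + 2)).drop (o + 1) = cs.drop (o + 2) := by
            rw [List.drop_append_of_le_length (by simp; omega)]
            simp [List.drop_eq_nil_of_le]
          rw [htk, hdr]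
          rw [take_getD_snoc cs o ho, hz, hdrop, hz, hdrop1, hdrop2, hp, zz]
          rw [if_pos ⟨rfl, rfl⟩, zz_cons_ne _ _ (by decide)]
          simp
        · simp only [hc, if_false]
          rw [ih cs (o + 1) (by omega)]
          have hget1 : (cs.drop (o + 1)).getD 1 ' ' = cs.getD (o + 2) ' ' := by
            simp [List.getD_eq_getElem?_getD]
          have ht : 2 ≤ (cs.drop (o + 1)).length := by simp; omega
          rw [hdrop, zz_cons_of_not _ _ (by rw [hget1]; tauto) ht, take_getD_snoc cs o ho]
          simp
      · simp only [h2, if_false]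
        have hshort : (cs.drop o).length ≤ 2 := by simp; omega
        rw [zz_short _ hshort]
        simp

theorem zipZapAgo_eq (cs : List Char) (o : Nat) :
    zipZapAgo cs o = cs.take o ++ zz (cs.drop o) :=
  zipZapAgo_eq_aux cs.length cs o (by omega)

-- ===== VERDICT (by name: the statement is the Claim_ definition above) =====
theorem zipZap_spec : Claim_equal_zipZap := by
  intro text _
  unfold Spec_zipZap zipZap zipZap_alt
  rw [zipZapAgo_eq, zipZapBgo_eq]
  simp
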